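-- pv_equiv track=rewrite | github.com/cutecryptid/minish-hat | minish-ruleset.py | check_partial_adj
-- ===== SOURCE A (Python) =====
-- def check_partial_adj(p0, p1):
--     or_ret = p0 | p1
--     and_ret = p0 & p1
--     xor_ret = p0 ^ p1
--     mask = 0
--     comp_mask = 0
--     pos = 0
--     a = p0
--     b = p1
--     and_ret_cp = and_ret
--     or_ret_cp = or_ret
--     while a or b or and_ret_cp:
--         ret = 0
--         if (and_ret_cp & 7 == 0) and ((or_ret_cp & 7) in (3,6)):
--             ret = 7
--         elif (and_ret_cp & 7 == 2) and a&7 != b&7 and a&7 in (3,6) and b&7 in (3,6):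
--             ret = 7
--         mask += ret * (8 ** pos)
--         comp_mask += (7-ret) * (8 ** pos)
--         pos += 1
--         and_ret_cp >>= 3
--         or_ret_cp >>= 3
--         a >>= 3
--         b >>= 3
--     count = 0
--     masked_xor = xor_ret & comp_mask
--     mask_cp = mask
--     while mask_cp:
--         count += 1 if (mask_cp & 7 == 7) else 0
--         mask_cp >>= 3
--     return mask > 0 and count == 1 and masked_xor != 0
-- ===== SOURCE B (Python) =====
-- def check_partial_adj(p0, p1):
--     def octal_digits(n):
--         ds = []
--         while n:
--             ds.append(n & 7)
--             n >>= 3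
--         return ds
--
--     def blocked(x, y):
--         return ((x & y) == 0 and (x | y) in (3, 6)) or \
--                ((x & y) == 2 and x != y and x in (3, 6) and y in (3, 6))
--
--     d0 = octal_digits(p0)
--     d1 = octal_digits(p1)
--     d0 = d0 + [0] * (len(d1) - len(d0))
--     d1 = d1 + [0] * (len(d0) - len(d1))
--     pairs = list(zip(d0, d1))
--     sevens = sum(1 for x, y in pairs if blocked(x, y))
--     free_diff = any(x != y for x, y in pairs if not blocked(x, y))
--     return sevens == 1 and free_diff
-- ===== Notes on version B (the rewrite author's own statement) =====
-- stated objective: simpler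
-- what changed: B decomposes the numbers into octal digit lists once, pads and zips them, and answers by counting blocking digit pairs and testing for a differing unblocked pair, eliminating A's two accumulator while-loops over big-integer mask/comp_mask and the rescan of mask.
import Mathlib
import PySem

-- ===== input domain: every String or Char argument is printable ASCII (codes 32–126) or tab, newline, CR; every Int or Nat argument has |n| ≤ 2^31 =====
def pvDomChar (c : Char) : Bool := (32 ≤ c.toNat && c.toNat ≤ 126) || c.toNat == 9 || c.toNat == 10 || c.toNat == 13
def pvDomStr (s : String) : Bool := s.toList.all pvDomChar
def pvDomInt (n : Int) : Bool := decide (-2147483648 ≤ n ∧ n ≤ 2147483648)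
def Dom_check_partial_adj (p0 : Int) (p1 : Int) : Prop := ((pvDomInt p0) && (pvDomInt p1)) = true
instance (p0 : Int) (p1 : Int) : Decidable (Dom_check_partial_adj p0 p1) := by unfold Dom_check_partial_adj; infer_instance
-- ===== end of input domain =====

-- B replaces A's two accumulator while-loops (big-integer mask/comp_mask plus a rescan of
-- mask) by an octal-digit-list decomposition: extract digit lists, pad, zip, then count the
-- blocking digit pairs and test for a differing unblocked pair (objective: simpler).

-- ===== PORT A =====
-- A's first while loop; fuel 64 covers every input in Dom (|p| ≤ 2^31 needs ≤ 11 octal digits);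
-- on the admitted (nonnegative) inputs the loop really stops before the fuel does.
def pvLoopA : Nat → Int → Int → Int → Int → Nat → Int → Int → Int × Int
  | 0, _, _, _, _, _, mask, comp => (mask, comp)
  | fuel+1, a, b, andc, orc, pos, mask, comp =>
    if a ≠ 0 ∨ b ≠ 0 ∨ andc ≠ 0 then
      let ret : Int :=
        if PySem.Int.band andc 7 = 0 ∧ (PySem.Int.band orc 7 = 3 ∨ PySem.Int.band orc 7 = 6) then 7
        else if PySem.Int.band andc 7 = 2 ∧ PySem.Int.band a 7 ≠ PySem.Int.band b 7 ∧
                (PySem.Int.band a 7 = 3 ∨ PySem.Int.band a 7 = 6) ∧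
                (PySem.Int.band b 7 = 3 ∨ PySem.Int.band b 7 = 6) then 7
        else 0
      pvLoopA fuel (a >>> 3) (b >>> 3) (andc >>> 3) (orc >>> 3) (pos + 1)
        (mask + ret * 8 ^ pos) (comp + (7 - ret) * 8 ^ pos)
    else (mask, comp)

-- A's second while loop (counting 7-digits of mask)
def pvCountA : Nat → Int → Int → Int
  | 0, _, count => count
  | fuel+1, maskCp, count =>
    if maskCp ≠ 0 then
      pvCountA fuel (maskCp >>> 3) (count + if PySem.Int.band maskCp 7 = 7 then 1 else 0)
    else count

def check_partial_adj (p0 : Int) (p1 : Int) : Bool :=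
  let or_ret := PySem.Int.bor p0 p1
  let and_ret := PySem.Int.band p0 p1
  let xor_ret := PySem.Int.bxor p0 p1
  let mc := pvLoopA 64 p0 p1 and_ret or_ret 0 0 0
  let masked_xor := PySem.Int.band xor_ret mc.2
  let count := pvCountA 64 mc.1 0
  decide (mc.1 > 0) && decide (count = 1) && decide (masked_xor ≠ 0)

-- ===== PORT B =====
-- Source B's octal_digits while loop, same fuel convention as A's port
def pvDigits : Nat → Int → List Int
  | 0, _ => []
  | fuel+1, n =>
    if n ≠ 0 then PySem.Int.band n 7 :: pvDigits fuel (n >>> 3) else []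

-- Source B's blocked(x, y)
def pvBlocked (x y : Int) : Bool :=
  (PySem.Int.band x y == 0 && (PySem.Int.bor x y == 3 || PySem.Int.bor x y == 6)) ||
  (PySem.Int.band x y == 2 && x != y && (x == 3 || x == 6) && (y == 3 || y == 6))

def check_partial_adj_alt (p0 : Int) (p1 : Int) : Bool :=
  let d0 := pvDigits 64 p0
  let d1 := pvDigits 64 p1
  let d0' := d0 ++ List.replicate (d1.length - d0.length) (0 : Int)
  let d1' := d1 ++ List.replicate (d0'.length - d1.length) (0 : Int)
  let pairs := d0'.zip d1'
  let sevens := pairs.countP (fun p => pvBlocked p.1 p.2)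
  let freeDiff := pairs.any (fun p => !pvBlocked p.1 p.2 && p.1 != p.2)
  decide (sevens = 1) && freeDiff

-- ===== PRECONDITION & SPEC =====
-- Pre_ excludes inputs with a negative argument: there a shifted copy sticks at -1, the
-- while condition stays true and Python A (and B) never returns (infinite loop).
def Pre_check_partial_adj (p0 : Int) (p1 : Int) : Prop := 0 ≤ p0 ∧ 0 ≤ p1
instance (p0 : Int) (p1 : Int) : Decidable (Pre_check_partial_adj p0 p1) := by
  unfold Pre_check_partial_adj; infer_instance
def pvWitness_check_partial_adj : Int × Int := (27, 25)

def Spec_check_partial_adj (p0 : Int) (p1 : Int) (out : Bool) : Prop := out = check_partial_adj_alt p0 p1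
instance (p0 : Int) (p1 : Int) (out : Bool) : Decidable (Spec_check_partial_adj p0 p1 out) := by unfold Spec_check_partial_adj; infer_instance

-- ===== CLAIM (what is proved, stated in full; the proofs are below) =====
def Claim_equal_check_partial_adj : Prop := ∀ (p0 : Int) (p1 : Int), Dom_check_partial_adj p0 p1 → Pre_check_partial_adj p0 p1 → Spec_check_partial_adj p0 p1 (check_partial_adj p0 p1)

-- ===== LEMMAS AND PROOFS =====

-- Nat-level digit decision of A's loop
def pvRetN (a b andc orc : Nat) : Nat :=
  if andc % 8 = 0 ∧ (orc % 8 = 3 ∨ orc % 8 = 6) then 7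
  else if andc % 8 = 2 ∧ a % 8 ≠ b % 8 ∧ (a % 8 = 3 ∨ a % 8 = 6) ∧ (b % 8 = 3 ∨ b % 8 = 6) then 7
  else 0

-- abstract (head-first, accumulator-free) version of A's first loop: (mask, comp_mask)
def pvLA : Nat → Nat → Nat → Nat → Nat → Nat × Nat
  | 0, _, _, _, _ => (0, 0)
  | fuel+1, a, b, andc, orc =>
    if a ≠ 0 ∨ b ≠ 0 ∨ andc ≠ 0 then
      let r := pvRetN a b andc orc
      let p := pvLA fuel (a / 8) (b / 8) (andc / 8) (orc / 8)
      (r + 8 * p.1, (7 - r) + 8 * p.2)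
    else (0, 0)

-- abstract version of A's counting loop
def pvCN (m : Nat) : Nat :=
  if m = 0 then 0 else (if m % 8 = 7 then 1 else 0) + pvCN (m / 8)
decreasing_by exact Nat.div_lt_self (Nat.pos_of_ne_zero (by assumption)) (by norm_num)

-- Nat-level joint digit-pair list mirroring B's pad-and-zip
def pvJoint : Nat → Nat → Nat → List (Nat × Nat)
  | 0, _, _ => []
  | fuel+1, a, b =>
    if a ≠ 0 ∨ b ≠ 0 then (a % 8, b % 8) :: pvJoint fuel (a / 8) (b / 8) else []

def pvBlockedN (x y : Nat) : Bool :=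
  ((x &&& y) == 0 && ((x ||| y) == 3 || (x ||| y) == 6)) ||
  ((x &&& y) == 2 && x != y && (x == 3 || x == 6) && (y == 3 || y == 6))

-- B's pad-and-zip as a proof-side helper (definitionally the port's let-chain)
def pvZP (d0 d1 : List Int) : List (Int × Int) :=
  let d0' := d0 ++ List.replicate (d1.length - d0.length) (0 : Int)
  let d1' := d1 ++ List.replicate (d0'.length - d1.length) (0 : Int)
  d0'.zip d1'

lemma pvRet_lt (a b andc orc : Nat) : pvRetN a b andc orc < 8 := by
  unfold pvRetN; split_ifs <;> norm_num

lemma pvTestBit_head (d y : Nat) (hd : d < 8) (i : Nat) :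
    (d + 8 * y).testBit i = if i < 3 then d.testBit i else y.testBit (i - 3) := by
  have hmod : (d + 8 * y) % 8 = d := by omega
  have hdiv : (d + 8 * y) / 8 = y := by omega
  by_cases hi : i < 3
  · have : d.testBit i = ((d + 8 * y) % 2 ^ 3).testBit i := by norm_num [hmod]
    rw [this, Nat.testBit_mod_two_pow]
    simp [hi]
  · have : y.testBit (i - 3) = ((d + 8 * y) / 2 ^ 3).testBit (i - 3) := by norm_num [hdiv]
    rw [if_neg hi, this, Nat.testBit_div_two_pow]
    congr 1
    omega

lemma pvLand_digit (x d y : Nat) (hd : d < 8) :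
    x &&& (d + 8 * y) = (x % 8 &&& d) + 8 * (x / 8 &&& y) := by
  have h1 : (x % 8 &&& d) < 8 := lt_of_le_of_lt Nat.and_le_right hd
  apply Nat.eq_of_testBit_eq
  intro i
  rw [Nat.testBit_and, pvTestBit_head d y hd i, pvTestBit_head _ _ h1 i]
  by_cases hi : i < 3
  · have hx : (x % 8).testBit i = ((x % 2 ^ 3).testBit i) := by norm_num
    rw [if_pos hi, if_pos hi, Nat.testBit_and, hx, Nat.testBit_mod_two_pow]
    simp [hi]
  · have hx : (x / 8).testBit (i - 3) = ((x / 2 ^ 3).testBit (i - 3)) := by norm_num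
    rw [if_neg hi, if_neg hi, Nat.testBit_and, hx, Nat.testBit_div_two_pow]
    congr 2
    omega

lemma pvCN_digit (r m : Nat) (hr : r < 8) :
    pvCN (r + 8 * m) = (if r = 7 then 1 else 0) + pvCN m := by
  by_cases h0 : r + 8 * m = 0
  · have hr0 : r = 0 := by omega
    have hm0 : m = 0 := by omega
    subst hr0; subst hm0
    simp [pvCN]
  · rw [pvCN]
    have hmod : (r + 8 * m) % 8 = r := by omega
    have hdiv : (r + 8 * m) / 8 = m := by omega
    rw [if_neg h0, hmod, hdiv]

-- mask digits ≤ 7, so the mask stays below 8^fuel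
lemma pvLA_lt (fuel a b andc orc : Nat) : (pvLA fuel a b andc orc).1 < 8 ^ fuel := by
  induction fuel generalizing a b andc orc with
  | zero => simp [pvLA]
  | succ f ih =>
    rw [pvLA]
    split
    · have h1 := ih (a / 8) (b / 8) (andc / 8) (orc / 8)
      have h2 := pvRet_lt a b andc orc
      have : (8:Nat) ^ (f + 1) = 8 * 8 ^ f := by ring
      simp only []
      omega
    · positivity

-- digitwise ops commute with /8 and %8
lemma pvDiv8_and (a b : Nat) : (a &&& b) / 8 = a / 8 &&& b / 8 := by
  apply Nat.eq_of_testBit_eq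
  intro i
  have h : ∀ x : Nat, x / 8 = x / 2 ^ 3 := fun x => by norm_num
  simp only [h, Nat.testBit_div_two_pow, Nat.testBit_and]

lemma pvDiv8_or (a b : Nat) : (a ||| b) / 8 = a / 8 ||| b / 8 := by
  apply Nat.eq_of_testBit_eq
  intro i
  have h : ∀ x : Nat, x / 8 = x / 2 ^ 3 := fun x => by norm_num
  simp only [h, Nat.testBit_div_two_pow, Nat.testBit_or]

lemma pvDiv8_xor (a b : Nat) : (a ^^^ b) / 8 = a / 8 ^^^ b / 8 := by
  apply Nat.eq_of_testBit_eq
  intro i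
  have h : ∀ x : Nat, x / 8 = x / 2 ^ 3 := fun x => by norm_num
  simp only [h, Nat.testBit_div_two_pow, Nat.testBit_xor]

lemma pvMod8_and (a b : Nat) : (a &&& b) % 8 = a % 8 &&& b % 8 := by
  apply Nat.eq_of_testBit_eq
  intro i
  have h : ∀ x : Nat, x % 8 = x % 2 ^ 3 := fun x => by norm_num
  simp only [h, Nat.testBit_mod_two_pow, Nat.testBit_and]
  by_cases hi : i < 3 <;> simp [hi]

lemma pvMod8_or (a b : Nat) : (a ||| b) % 8 = a % 8 ||| b % 8 := by
  apply Nat.eq_of_testBit_eq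
  intro i
  have h : ∀ x : Nat, x % 8 = x % 2 ^ 3 := fun x => by norm_num
  simp only [h, Nat.testBit_mod_two_pow, Nat.testBit_or]
  by_cases hi : i < 3 <;> simp [hi]

lemma pvMod8_xor (a b : Nat) : (a ^^^ b) % 8 = a % 8 ^^^ b % 8 := by
  apply Nat.eq_of_testBit_eq
  intro i
  have h : ∀ x : Nat, x % 8 = x % 2 ^ 3 := fun x => by norm_num
  simp only [h, Nat.testBit_mod_two_pow, Nat.testBit_xor]
  by_cases hi : i < 3 <;> simp [hi]

-- casts: Int-level band with the literal 7 over a natural number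
lemma pvBand7 (a : Nat) : PySem.Int.band (a : Nat) 7 = ((a &&& 7 : Nat) : Int) := by
  have : (7:Int) = ((7:Nat):Int) := rfl
  rw [this, PySem.Int.band_natCast]

lemma pvAnd7_mod (a : Nat) : a &&& 7 = a % 8 := by
  have : (7:Nat) = 2 ^ 3 - 1 := by norm_num
  rw [this, Nat.and_two_pow_sub_one_eq_mod]

-- equality test on casts
lemma pvBeq_cast (x y : Nat) : (((x:Int)) == ((y:Int))) = (x == y) := by
  rw [Bool.eq_iff_iff]
  simp

-- A's ret digit equals 7 exactly on B's blocked digit pairs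
lemma pvRet_blocked (a b : Nat) :
    pvRetN a b (a &&& b) (a ||| b) = if pvBlockedN (a % 8) (b % 8) then 7 else 0 := by
  unfold pvRetN pvBlockedN
  rw [pvMod8_and, pvMod8_or]
  simp only [Bool.or_eq_true, Bool.and_eq_true, beq_iff_eq, bne_iff_ne]
  split_ifs <;> tauto

-- the Int-level ret computed by A's port equals the Nat-level pvRetN
lemma pvRet_cast (a b andc orc : Nat) :
    (if PySem.Int.band (andc:Int) 7 = 0 ∧ (PySem.Int.band (orc:Int) 7 = 3 ∨ PySem.Int.band (orc:Int) 7 = 6) then (7:Int)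
     else if PySem.Int.band (andc:Int) 7 = 2 ∧ PySem.Int.band (a:Int) 7 ≠ PySem.Int.band (b:Int) 7 ∧
             (PySem.Int.band (a:Int) 7 = 3 ∨ PySem.Int.band (a:Int) 7 = 6) ∧
             (PySem.Int.band (b:Int) 7 = 3 ∨ PySem.Int.band (b:Int) 7 = 6) then 7
     else 0) = ((pvRetN a b andc orc : Nat) : Int) := by
  rw [pvBand7 a, pvBand7 b, pvBand7 andc, pvBand7 orc,
      pvAnd7_mod, pvAnd7_mod, pvAnd7_mod, pvAnd7_mod]
  unfold pvRetN
  split_ifs <;> push_cast <;> simp_all <;> omega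

-- bridge: A's Int loop on casts = accumulators + 8^pos · the abstract loop
lemma pvLoopA_cast (fuel : Nat) (a b andc orc : Nat) (pos : Nat) (m c : Int) :
    pvLoopA fuel (a:Int) (b:Int) (andc:Int) (orc:Int) pos m c =
      (m + 8 ^ pos * ((pvLA fuel a b andc orc).1 : Int),
       c + 8 ^ pos * ((pvLA fuel a b andc orc).2 : Int)) := by
  induction fuel generalizing a b andc orc pos m c with
  | zero => simp [pvLoopA, pvLA]
  | succ f ih =>
    rw [pvLoopA, pvLA]
    have hcond : ((a:Int) ≠ 0 ∨ (b:Int) ≠ 0 ∨ (andc:Int) ≠ 0) ↔ (a ≠ 0 ∨ b ≠ 0 ∨ andc ≠ 0) := by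
      simp
    by_cases h : a ≠ 0 ∨ b ≠ 0 ∨ andc ≠ 0
    · rw [if_pos (hcond.mpr h), if_pos h]
      simp only [pvRet_cast]
      have hs : ∀ x : Nat, ((x:Int) >>> 3) = ((x >>> 3 : Nat) : Int) := fun _ => rfl
      have hd : ∀ x : Nat, x >>> 3 = x / 8 := fun x => by
        simp [Nat.shiftRight_eq_div_pow]
      rw [hs, hs, hs, hs, hd, hd, hd, hd, ih, Prod.mk.injEq]
      have hr : pvRetN a b andc orc ≤ 7 := by
        have := pvRet_lt a b andc orc; omega
      refine ⟨by push_cast; ring, by push_cast [Nat.cast_sub hr]; ring⟩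
    · rw [if_neg (by simpa [hcond] using h), if_neg h]
      simp

-- bridge: A's Int counting loop on a cast = accumulator + the abstract count (fuel suffices)
lemma pvCountA_cast (fuel : Nat) (m : Nat) (cnt : Int) (hm : m < 8 ^ fuel) :
    pvCountA fuel (m:Int) cnt = cnt + ((pvCN m : Nat) : Int) := by
  induction fuel generalizing m cnt with
  | zero =>
    have : m = 0 := by simpa using hm
    subst this
    simp [pvCountA, pvCN]
  | succ f ih =>
    rw [pvCountA]
    by_cases h : m = 0
    · subst h
      simp [pvCN]
    · rw [if_pos (by exact_mod_cast h)]
      have hs : ((m:Int) >>> 3) = ((m >>> 3 : Nat) : Int) := rfl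
      have hd : m >>> 3 = m / 8 := by simp [Nat.shiftRight_eq_div_pow]
      have hm' : m / 8 < 8 ^ f := by
        rw [Nat.div_lt_iff_lt_mul (by norm_num)]
        calc m < 8 ^ (f + 1) := hm
        _ = 8 ^ f * 8 := by ring
      rw [hs, hd, ih _ _ hm', pvBand7, pvAnd7_mod]
      conv_rhs => rw [pvCN, if_neg h]
      by_cases h7 : m % 8 = 7
      · rw [if_pos (show ((m % 8 : Nat):Int) = 7 by exact_mod_cast h7), if_pos h7]
        push_cast
        ring
      · rw [if_neg (show ¬((m % 8 : Nat):Int) = 7 by exact_mod_cast h7), if_neg h7]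
        push_cast
        ring

lemma pvDigits_zero (fuel : Nat) : pvDigits fuel (0:Int) = [] := by
  cases fuel <;> simp [pvDigits]

lemma pvDigits_cons (fuel : Nat) (a : Nat) (ha : a ≠ 0) :
    pvDigits (fuel+1) (a:Int) = ((a % 8 : Nat) : Int) :: pvDigits fuel ((a / 8 : Nat) : Int) := by
  rw [pvDigits, if_pos (by exact_mod_cast ha)]
  have hs : ((a:Int) >>> 3) = ((a >>> 3 : Nat) : Int) := rfl
  have hd : a >>> 3 = a / 8 := by simp [Nat.shiftRight_eq_div_pow]
  rw [pvBand7, pvAnd7_mod, hs, hd]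

-- structural laws of B's pad-and-zip
lemma pvZP_cons_cons (x y : Int) (d0 d1 : List Int) :
    pvZP (x :: d0) (y :: d1) = (x, y) :: pvZP d0 d1 := by
  unfold pvZP
  simp only [List.length_cons, List.cons_append, List.length_append, List.length_replicate]
  rw [show d1.length + 1 - (d0.length + 1) = d1.length - d0.length from by omega]
  rw [show d0.length + (d1.length - d0.length) + 1 - (d1.length + 1) =
        d0.length + (d1.length - d0.length) - d1.length from by omega]
  rw [List.zip_cons_cons]

lemma pvZP_nil_cons (y : Int) (d1 : List Int) :
    pvZP [] (y :: d1) = ((0 : Int), y) :: pvZP [] d1 := by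
  unfold pvZP
  simp [List.replicate_succ, List.zip_cons_cons]

lemma pvZP_cons_nil (x : Int) (d0 : List Int) :
    pvZP (x :: d0) [] = (x, (0 : Int)) :: pvZP d0 [] := by
  unfold pvZP
  simp [List.replicate_succ, List.zip_cons_cons]

-- B's pad-and-zip of the digit lists is the joint digit-pair recursion
lemma pvZP_joint (fuel a b : Nat) :
    pvZP (pvDigits fuel (a:Int)) (pvDigits fuel (b:Int)) =
      (pvJoint fuel a b).map (fun p : Nat × Nat => ((p.1 : Int), (p.2 : Int))) := by
  induction fuel generalizing a b with
  | zero => simp [pvZP, pvDigits, pvJoint]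
  | succ f ih =>
    by_cases ha : a = 0
    · subst ha
      by_cases hb : b = 0
      · subst hb
        simp [pvZP, pvDigits, pvJoint]
      · rw [pvJoint, if_pos (Or.inr hb), pvDigits_cons f b hb,
            show ((0:Nat):Int) = 0 from rfl, show pvDigits (f+1) (0:Int) = [] from by simp [pvDigits],
            pvZP_nil_cons, List.map_cons]
        have := ih 0 (b / 8)
        rw [Nat.cast_zero, pvDigits_zero] at this
        simp only [Nat.zero_div, Nat.zero_mod, Nat.cast_zero]
        rw [this]
    · by_cases hb : b = 0
      · subst hb
        rw [pvJoint, if_pos (Or.inl ha), pvDigits_cons f a ha,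
            show ((0:Nat):Int) = 0 from rfl, show pvDigits (f+1) (0:Int) = [] from by simp [pvDigits],
            pvZP_cons_nil, List.map_cons]
        have := ih (a / 8) 0
        rw [Nat.cast_zero, pvDigits_zero] at this
        simp only [Nat.zero_div, Nat.zero_mod, Nat.cast_zero]
        rw [this]
      · rw [pvJoint, if_pos (Or.inl ha), pvDigits_cons f a ha, pvDigits_cons f b hb,
            pvZP_cons_cons, List.map_cons, ih]

-- B's Int blocked on cast digits = Nat blocked
lemma pvBlocked_cast (x y : Nat) : pvBlocked ((x:Nat):Int) ((y:Nat):Int) = pvBlockedN x y := by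
  unfold pvBlocked pvBlockedN
  have h3 : (3:Int) = ((3:Nat):Int) := rfl
  have h6 : (6:Int) = ((6:Nat):Int) := rfl
  have h0 : (0:Int) = ((0:Nat):Int) := rfl
  have h2 : (2:Int) = ((2:Nat):Int) := rfl
  rw [PySem.Int.band_natCast, PySem.Int.bor_natCast, h3, h6, h0, h2, Bool.eq_iff_iff]
  simp only [Bool.or_eq_true, Bool.and_eq_true, beq_iff_eq, bne_iff_ne, Nat.cast_inj, ne_eq]

-- count of 7-digits of A's mask = B's count of blocked pairs
lemma pvCN_joint (fuel a b : Nat) :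
    pvCN (pvLA fuel a b (a &&& b) (a ||| b)).1 =
      (pvJoint fuel a b).countP (fun p => pvBlockedN p.1 p.2) := by
  induction fuel generalizing a b with
  | zero => simp [pvLA, pvJoint, pvCN]
  | succ f ih =>
    by_cases h : a ≠ 0 ∨ b ≠ 0
    · rw [pvLA, if_pos (by tauto), pvJoint, if_pos h]
      simp only [pvDiv8_and, pvDiv8_or]
      rw [pvCN_digit _ _ (pvRet_lt a b (a &&& b) (a ||| b)), ih, List.countP_cons]
      rw [pvRet_blocked]
      by_cases hb : pvBlockedN (a % 8) (b % 8) = true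
      · simp [hb]
        omega
      · simp only [Bool.not_eq_true] at hb
        simp [hb]
    · push Not at h
      obtain ⟨ha, hb⟩ := h
      subst ha; subst hb
      simp [pvLA, pvJoint, pvCN]

-- masked xor nonzero = some unblocked pair differs
lemma pvMX_joint (fuel a b : Nat) :
    (((a ^^^ b) &&& (pvLA fuel a b (a &&& b) (a ||| b)).2) ≠ 0) ↔
      ((pvJoint fuel a b).any (fun p => !pvBlockedN p.1 p.2 && p.1 != p.2) = true) := by
  induction fuel generalizing a b with
  | zero => simp [pvLA, pvJoint]
  | succ f ih =>
    by_cases h : a ≠ 0 ∨ b ≠ 0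
    · rw [pvLA, if_pos (by tauto), pvJoint, if_pos h]
      simp only [pvDiv8_and, pvDiv8_or]
      have hr := pvRet_lt a b (a &&& b) (a ||| b)
      rw [pvLand_digit _ _ _ (show 7 - pvRetN a b (a &&& b) (a ||| b) < 8 by omega)]
      rw [pvDiv8_xor, List.any_cons]
      have htail := ih (a / 8) (b / 8)
      rw [pvRet_blocked]
      by_cases hb : pvBlockedN (a % 8) (b % 8) = true
      · rw [if_pos hb]
        simp only [Nat.sub_self, Nat.and_zero, Nat.zero_add, hb, Bool.not_true, Bool.false_and,
          Bool.false_or]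
        constructor
        · intro hne
          exact htail.mp (by omega)
        · intro hany
          have := htail.mpr hany
          omega
      · rw [if_neg hb]
        have hhd : (a ^^^ b) % 8 &&& 7 = a % 8 ^^^ b % 8 := by
          rw [pvAnd7_mod, show (a ^^^ b) % 8 % 8 = (a ^^^ b) % 8 from by omega, pvMod8_xor]
        rw [Nat.sub_zero, hhd]
        simp only [hb, Bool.not_false, Bool.true_and, Bool.or_eq_true]
        have hu : a % 8 ^^^ b % 8 = 0 ↔ a % 8 = b % 8 := Nat.xor_eq_zero_iff
        constructor
        · intro hne
          by_cases hh : a % 8 ^^^ b % 8 = 0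
          · right
            exact htail.mp (by omega)
          · left
            simp only [bne_iff_ne, ne_eq]
            exact mt hu.mpr hh
        · intro hor
          rcases hor with hd | hany
          · have hne : ¬ (a % 8 = b % 8) := by simpa using hd
            have : a % 8 ^^^ b % 8 ≠ 0 := fun hz => hne (hu.mp hz)
            omega
          · have := htail.mpr hany
            omega
    · push Not at h
      obtain ⟨ha, hb⟩ := h
      subst ha; subst hb
      simp [pvLA, pvJoint]

-- ===== VERDICT (by name: the statement is the Claim_ definition above) =====
theorem check_partial_adj_spec : Claim_equal_check_partial_adj := by
  intro p0 p1 _hdom hpre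
  unfold Spec_check_partial_adj
  obtain ⟨h0, h1⟩ := hpre
  obtain ⟨a, rfl⟩ : ∃ a : Nat, p0 = (a:Int) := ⟨p0.toNat, (Int.toNat_of_nonneg h0).symm⟩
  obtain ⟨b, rfl⟩ : ∃ b : Nat, p1 = (b:Int) := ⟨p1.toNat, (Int.toNat_of_nonneg h1).symm⟩
  unfold check_partial_adj check_partial_adj_alt
  simp only [PySem.Int.bor_natCast, PySem.Int.band_natCast, PySem.Int.bxor_natCast]
  rw [pvLoopA_cast]
  simp only [pow_zero, one_mul, zero_add]
  rw [pvCountA_cast 64 _ 0 (pvLA_lt 64 a b (a &&& b) (a ||| b))]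
  rw [PySem.Int.band_natCast]
  have hzp : (pvDigits 64 (a:Int) ++ List.replicate ((pvDigits 64 (b:Int)).length - (pvDigits 64 (a:Int)).length) (0:Int)).zip
      ((pvDigits 64 (b:Int)) ++ List.replicate ((pvDigits 64 (a:Int) ++ List.replicate ((pvDigits 64 (b:Int)).length - (pvDigits 64 (a:Int)).length) (0:Int)).length - (pvDigits 64 (b:Int)).length) (0:Int)) =
      (pvJoint 64 a b).map (fun p : Nat × Nat => ((p.1 : Int), (p.2 : Int))) := pvZP_joint 64 a b
  rw [hzp, List.countP_map, List.any_map]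
  have hcp : ((fun p => pvBlocked p.1 p.2) ∘ (fun p : Nat × Nat => ((p.1 : Int), (p.2 : Int)))) =
      (fun p : Nat × Nat => pvBlockedN p.1 p.2) := by
    funext p
    simp [Function.comp, pvBlocked_cast]
  have hap : ((fun p => !pvBlocked p.1 p.2 && p.1 != p.2) ∘ (fun p : Nat × Nat => ((p.1 : Int), (p.2 : Int)))) =
      (fun p : Nat × Nat => !pvBlockedN p.1 p.2 && p.1 != p.2) := by
    funext p
    simp only [Function.comp_apply, pvBlocked_cast, bne, pvBeq_cast]
  rw [hcp, hap]
  set M := (pvLA 64 a b (a &&& b) (a ||| b)).1 with hM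
  have hcnt := pvCN_joint 64 a b
  have hmx := pvMX_joint 64 a b
  set C := (pvJoint 64 a b).countP (fun p => pvBlockedN p.1 p.2) with hC
  by_cases hc : C = 1
  · have hM0 : 0 < M := by
      rcases Nat.eq_zero_or_pos M with h | h
      · exfalso
        rw [← hM, h] at hcnt
        simp [pvCN] at hcnt
        omega
      · exact h
    have h2 : ((pvCN M : Nat):Int) = 1 := by rw [hcnt]; exact_mod_cast hc
    simp only [zero_add, h2, hc]
    by_cases hany : (pvJoint 64 a b).any (fun p => !pvBlockedN p.1 p.2 && p.1 != p.2) = true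
    · have hne := hmx.mpr hany
      simp [hany, hM0, hne]
    · have hz : ((a ^^^ b) &&& (pvLA 64 a b (a &&& b) (a ||| b)).2) = 0 := by
        by_contra hne
        exact hany (hmx.mp hne)
      simp [hany, hz]
  · have h2 : ¬(((pvCN M : Nat):Int) = 1) := by
      rw [hcnt]
      exact_mod_cast hc
    simp [h2, hc]
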